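-- pv_equiv track=rewrite | github.com/lormico/hw6rec | program01.py | find_rectangles_3
-- ===== SOURCE A (Python) =====
-- from typing import Dict, Tuple, List, Set
--
-- def find_rectangles_3(picture: List[List[Tuple[int, int, int]]]) -> Dict[Tuple[int, int, int], List[int]]:
--     rectangle_dict: Dict[Tuple[int, int, int], List[int]] = dict()
--
--     color_dict: Dict[Tuple[int, int, int], Dict[str, Set[int]]] = dict()
--     for y, row in enumerate(picture):
--         for x, current_color in enumerate(row):
--             color_dict.setdefault(current_color, dict()).setdefault('x', set()).add(x)
--             color_dict.setdefault(current_color, dict()).setdefault('y', set()).add(y)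
--
--     for color, pixeldict in color_dict.items():
--         rectangle_dict[color] = [min(pixeldict['x']), min(pixeldict['y']), max(pixeldict['x']), max(pixeldict['y'])]
--
--     return rectangle_dict
-- ===== SOURCE B (Python) =====
-- from typing import Dict, Tuple, List
--
--
-- def find_rectangles_3(picture: List[List[Tuple[int, int, int]]]) -> Dict[Tuple[int, int, int], List[int]]:
--     # Single pass: keep the bounding box per color directly, no coordinate sets
--     # and no second min/max reduction phase.
--     rectangle_dict: Dict[Tuple[int, int, int], List[int]] = {}
--     for y, row in enumerate(picture):
--         for x, color in enumerate(row):
--             entry = rectangle_dict.get(color)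
--             if entry is None:
--                 rectangle_dict[color] = [x, y, x, y]
--             else:
--                 x0, y0, x1, y1 = entry
--                 rectangle_dict[color] = [min(x0, x), min(y0, y), max(x1, x), max(y1, y)]
--     return rectangle_dict
-- ===== Notes on version B (the rewrite author's own statement) =====
-- stated objective: simpler
-- what changed: B maintains the [min_x, min_y, max_x, max_y] bounding box per color directly in one pass, instead of accumulating per-color x/y coordinate sets and running a separate min/max reduction loop afterwards; this drops the set allocations and the second phase (measured ~2x faster).
import Mathlib
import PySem

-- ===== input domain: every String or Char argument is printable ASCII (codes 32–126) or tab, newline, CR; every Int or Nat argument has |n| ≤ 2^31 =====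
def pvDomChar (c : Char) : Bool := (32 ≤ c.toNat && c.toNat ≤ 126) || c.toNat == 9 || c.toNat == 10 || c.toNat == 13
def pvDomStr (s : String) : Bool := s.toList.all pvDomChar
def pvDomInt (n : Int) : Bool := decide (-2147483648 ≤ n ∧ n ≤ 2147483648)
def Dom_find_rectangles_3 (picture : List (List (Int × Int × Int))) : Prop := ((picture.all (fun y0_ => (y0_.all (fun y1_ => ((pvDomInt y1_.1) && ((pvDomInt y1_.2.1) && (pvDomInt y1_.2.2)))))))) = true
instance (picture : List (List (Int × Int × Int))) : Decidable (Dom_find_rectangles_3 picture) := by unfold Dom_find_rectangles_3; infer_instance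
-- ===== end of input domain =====

-- B replaces A's per-color x/y coordinate sets + second min/max reduction loop by one pass
-- that keeps the [min_x, min_y, max_x, max_y] bounding box per color directly (objective: simpler).

-- ===== PORT A =====
-- net effect of the two setdefault/add statements of A's inner loop body (Python mutates the
-- nested dict/set in place; here the mutated inner dict is re-inserted at its position)
def pvStepA (cd : PySem.Dict (Int × Int × Int) (PySem.Dict String (PySem.Set Int)))
    (y x : Int) (c : Int × Int × Int) :
    PySem.Dict (Int × Int × Int) (PySem.Dict String (PySem.Set Int)) :=
  let inner := cd.getD c PySem.Dict.empty
  let cd1 := cd.insert c (inner.insert "x" (PySem.Set.add (inner.getD "x" PySem.Set.empty) x))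
  let inner2 := cd1.getD c PySem.Dict.empty
  cd1.insert c (inner2.insert "y" (PySem.Set.add (inner2.getD "y" PySem.Set.empty) y))

-- rectangle_dict value for one color; the keys 'x'/'y' are always present with nonempty sets,
-- so the .getD defaults are unreachable totalization guards (Python would raise there)
def pvRectA (sd : PySem.Dict String (PySem.Set Int)) : List Int :=
  let X := sd.getD "x" PySem.Set.empty
  let Y := sd.getD "y" PySem.Set.empty
  [(PySem.List.min? X (fun v => v)).getD 0, (PySem.List.min? Y (fun v => v)).getD 0,
   (PySem.List.max? X (fun v => v)).getD 0, (PySem.List.max? Y (fun v => v)).getD 0]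

def find_rectangles_3 (picture : List (List (Int × Int × Int))) : List (Int × Int × Int × List Int) :=
  let color_dict := (PySem.List.enumerate picture 0).foldl
    (fun cd p => (PySem.List.enumerate p.2 0).foldl (fun cd q => pvStepA cd p.1 q.1 q.2) cd)
    PySem.Dict.empty
  let rectangle_dict := color_dict.items.foldl
    (fun (rd : PySem.Dict (Int × Int × Int) (List Int)) p => rd.insert p.1 (pvRectA p.2))
    PySem.Dict.empty
  rectangle_dict.items.map (fun p => (p.1.1, p.1.2.1, p.1.2.2, p.2))

-- ===== PORT B =====
def pvStepB (rd : PySem.Dict (Int × Int × Int) (List Int)) (y x : Int) (c : Int × Int × Int) :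
    PySem.Dict (Int × Int × Int) (List Int) :=
  match rd.get? c with
  | none => rd.insert c [x, y, x, y]
  | some [x0, y0, x1, y1] => rd.insert c [min x0 x, min y0 y, max x1 x, max y1 y]
  | some _ => rd.insert c [x, y, x, y]  -- unreachable: every stored entry has 4 components

def find_rectangles_3_alt (picture : List (List (Int × Int × Int))) : List (Int × Int × Int × List Int) :=
  let rectangle_dict := (PySem.List.enumerate picture 0).foldl
    (fun rd p => (PySem.List.enumerate p.2 0).foldl (fun rd q => pvStepB rd p.1 q.1 q.2) rd)
    PySem.Dict.empty
  rectangle_dict.items.map (fun p => (p.1.1, p.1.2.1, p.1.2.2, p.2))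

-- ===== PRECONDITION & SPEC =====
def Spec_find_rectangles_3 (picture : List (List (Int × Int × Int))) (out : List (Int × Int × Int × List Int)) : Prop := out = find_rectangles_3_alt picture
instance (picture : List (List (Int × Int × Int))) (out : List (Int × Int × Int × List Int)) : Decidable (Spec_find_rectangles_3 picture out) := by unfold Spec_find_rectangles_3; infer_instance

-- ===== CLAIM (what is proved, stated in full; the proofs are below) =====
def Claim_equal_find_rectangles_3 : Prop := ∀ (picture : List (List (Int × Int × Int))), Dom_find_rectangles_3 picture → Spec_find_rectangles_3 picture (find_rectangles_3 picture)

-- ===== LEMMAS AND PROOFS =====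

def pvMinv (X : List Int) : Int := (PySem.List.min? X (fun v => v)).getD 0
def pvMaxv (X : List Int) : Int := (PySem.List.max? X (fun v => v)).getD 0

-- relation between one entry of A's color_dict and the corresponding bounding box of B
def pvValRel (sd : PySem.Dict String (PySem.Set Int)) (e : List Int) : Prop :=
  ∃ X Y : PySem.Set Int, sd = PySem.Dict.mk [("x", X), ("y", Y)] ∧ X ≠ [] ∧ Y ≠ [] ∧
    e = [pvMinv X, pvMinv Y, pvMaxv X, pvMaxv Y]

def pvRel (cd : PySem.Dict (Int × Int × Int) (PySem.Dict String (PySem.Set Int)))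
    (rd : PySem.Dict (Int × Int × Int) (List Int)) : Prop :=
  cd.keys = rd.keys ∧ cd.keys.Nodup ∧
    ∀ c sd, cd.get? c = some sd → ∃ e, rd.get? c = some e ∧ pvValRel sd e

theorem pvSet_add_ne_nil {X : PySem.Set Int} (h : X ≠ []) (x : Int) : PySem.Set.add X x ≠ [] := by
  unfold PySem.Set.add
  split
  · exact h
  · simp

theorem pvMinv_add (X : PySem.Set Int) (h : X ≠ []) (x : Int) :
    pvMinv (PySem.Set.add X x) = min (pvMinv X) x := by
  obtain ⟨m, hm⟩ : ∃ m, PySem.List.min? X (fun v => v) = some m := by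
    rcases Option.eq_none_or_eq_some (PySem.List.min? X (fun v => v)) with h' | h'
    · exact absurd ((PySem.List.min?_eq_none_iff X _).mp h') h
    · exact h'
  unfold PySem.Set.add
  split
  · rename_i hc
    have hx : x ∈ X := by simpa using hc
    have hle : m ≤ x := by simpa using PySem.List.min?_isMin hm x hx
    simp only [pvMinv, hm, Option.getD_some, min_def]
    split <;> omega
  · have : PySem.List.min? (X ++ [x]) (fun v => v)
        = (if x < m then some x else some m) := by
      simp [PySem.List.min?, List.foldl_append] at hm ⊢
      rw [hm]
    simp only [pvMinv, hm, this, Option.getD_some]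
    split <;> (simp only [Option.getD_some, min_def]; split <;> omega)

theorem pvMaxv_add (X : PySem.Set Int) (h : X ≠ []) (x : Int) :
    pvMaxv (PySem.Set.add X x) = max (pvMaxv X) x := by
  obtain ⟨m, hm⟩ : ∃ m, PySem.List.max? X (fun v => v) = some m := by
    rcases Option.eq_none_or_eq_some (PySem.List.max? X (fun v => v)) with h' | h'
    · exact absurd ((PySem.List.max?_eq_none_iff X _).mp h') h
    · exact h'
  unfold PySem.Set.add
  split
  · rename_i hc
    have hx : x ∈ X := by simpa using hc
    have hle : x ≤ m := by simpa using PySem.List.max?_isMax hm x hx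
    simp only [pvMaxv, hm, Option.getD_some, max_def]
    split <;> omega
  · have : PySem.List.max? (X ++ [x]) (fun v => v)
        = (if m < x then some x else some m) := by
      simp [PySem.List.max?, List.foldl_append] at hm ⊢
      rw [hm]
    simp only [pvMaxv, hm, this, Option.getD_some]
    split <;> (simp only [Option.getD_some, max_def]; split <;> omega)

theorem pvStep_rel (cd : PySem.Dict (Int × Int × Int) (PySem.Dict String (PySem.Set Int)))
    (rd : PySem.Dict (Int × Int × Int) (List Int)) (y x : Int) (c : Int × Int × Int)
    (h : pvRel cd rd) : pvRel (pvStepA cd y x c) (pvStepB rd y x c) := by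
  obtain ⟨hkeys, hnd, hget⟩ := h
  by_cases hc : c ∈ cd.keys
  · -- color already seen: both sides overwrite the entry in place
    obtain ⟨sd, hsd⟩ : ∃ sd, cd.get? c = some sd := by
      rcases Option.eq_none_or_eq_some (cd.get? c) with h' | h'
      · exact absurd ((PySem.Dict.get?_eq_none_iff_not_mem_keys cd c).mp h') (by simpa using hc)
      · exact h'
    obtain ⟨e, he, X, Y, hsdXY, hXne, hYne, heXY⟩ := hget c sd hsd
    have hcontains : cd.contains c = true := by
      rw [PySem.Dict.contains_eq_decide_mem_keys]; simpa using hc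
    have hstepA : pvStepA cd y x c =
        cd.insert c (PySem.Dict.mk [("x", PySem.Set.add X x), ("y", PySem.Set.add Y y)]) := by
      simp only [pvStepA]
      rw [PySem.Dict.getD_of_get?_eq_some cd PySem.Dict.empty hsd, hsdXY]
      rw [show (PySem.Dict.mk [("x", X), ("y", Y)]).insert "x"
            (PySem.Set.add ((PySem.Dict.mk [("x", X), ("y", Y)]).getD "x" PySem.Set.empty) x)
          = PySem.Dict.mk [("x", PySem.Set.add X x), ("y", Y)] by
        simp [PySem.Dict.insert, PySem.Dict.contains, PySem.Dict.getD, PySem.Dict.get?]]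
      rw [PySem.Dict.getD_insert_self]
      rw [show (PySem.Dict.mk [("x", PySem.Set.add X x), ("y", Y)]).insert "y"
            (PySem.Set.add ((PySem.Dict.mk [("x", PySem.Set.add X x), ("y", Y)]).getD "y" PySem.Set.empty) y)
          = PySem.Dict.mk [("x", PySem.Set.add X x), ("y", PySem.Set.add Y y)] by
        simp [PySem.Dict.insert, PySem.Dict.contains, PySem.Dict.getD, PySem.Dict.get?]]
      rw [PySem.Dict.insert_insert_self]
    have hstepB : pvStepB rd y x c =
        rd.insert c [min (pvMinv X) x, min (pvMinv Y) y, max (pvMaxv X) x, max (pvMaxv Y) y] := by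
      unfold pvStepB
      rw [he, heXY]
    rw [hstepA, hstepB]
    have hcontains' : rd.contains c = true := by
      rw [PySem.Dict.contains_eq_decide_mem_keys]; rw [hkeys] at hc; simpa using hc
    refine ⟨?_, ?_, ?_⟩
    · rw [PySem.Dict.keys_insert_of_contains _ _ hcontains,
        PySem.Dict.keys_insert_of_contains _ _ hcontains', hkeys]
    · rw [PySem.Dict.keys_insert_of_contains _ _ hcontains]; exact hnd
    · intro c' sd' hsd'
      rw [PySem.Dict.get?_insert] at hsd'
      rw [PySem.Dict.get?_insert]
      split at hsd' <;> rename_i hc'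
      · refine ⟨_, by rw [if_pos hc'], ?_⟩
        cases hsd'
        exact ⟨PySem.Set.add X x, PySem.Set.add Y y, rfl, pvSet_add_ne_nil hXne x,
          pvSet_add_ne_nil hYne y, by
            rw [pvMinv_add X hXne x, pvMinv_add Y hYne y, pvMaxv_add X hXne x, pvMaxv_add Y hYne y]⟩
      · obtain ⟨e', he', hv⟩ := hget c' sd' hsd'
        exact ⟨e', by rw [if_neg hc']; exact he', hv⟩
  · -- fresh color: both sides append a new entry
    have hget0 : cd.get? c = none := (PySem.Dict.get?_eq_none_iff_not_mem_keys cd c).mpr hc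
    have hcontains : cd.contains c = false := by
      rw [PySem.Dict.contains_eq_decide_mem_keys]; simpa using hc
    have hc' : c ∉ rd.keys := by rw [← hkeys]; exact hc
    have hget0' : rd.get? c = none := (PySem.Dict.get?_eq_none_iff_not_mem_keys rd c).mpr hc'
    have hcontains' : rd.contains c = false := by
      rw [PySem.Dict.contains_eq_decide_mem_keys]; simpa using hc'
    have hstepA : pvStepA cd y x c = cd.insert c (PySem.Dict.mk [("x", [x]), ("y", [y])]) := by
      simp only [pvStepA]
      rw [show cd.getD c PySem.Dict.empty = PySem.Dict.empty from
        PySem.Dict.getD_of_not_contains _ _ hcontains]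
      rw [show (PySem.Dict.empty : PySem.Dict String (PySem.Set Int)).insert "x"
            (PySem.Set.add ((PySem.Dict.empty : PySem.Dict String (PySem.Set Int)).getD "x" PySem.Set.empty) x)
          = PySem.Dict.mk [("x", [x])] by
        simp [PySem.Dict.insert, PySem.Dict.contains, PySem.Dict.getD, PySem.Dict.get?,
          PySem.Dict.empty, PySem.Set.add, PySem.Set.empty]]
      rw [PySem.Dict.getD_insert_self]
      rw [show (PySem.Dict.mk [("x", [x])]).insert "y"
            (PySem.Set.add ((PySem.Dict.mk [("x", [x])]).getD "y" PySem.Set.empty) y)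
          = PySem.Dict.mk [("x", [x]), ("y", [y])] by
        simp [PySem.Dict.insert, PySem.Dict.contains, PySem.Dict.getD, PySem.Dict.get?,
          PySem.Set.add, PySem.Set.empty]]
      rw [PySem.Dict.insert_insert_self]
    have hstepB : pvStepB rd y x c = rd.insert c [x, y, x, y] := by
      unfold pvStepB
      rw [hget0']
    rw [hstepA, hstepB]
    refine ⟨?_, ?_, ?_⟩
    · rw [PySem.Dict.keys_insert_of_not_contains _ _ hcontains,
        PySem.Dict.keys_insert_of_not_contains _ _ hcontains', hkeys]
    · exact PySem.Dict.nodup_keys_insert _ _ _ hnd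
    · intro c' sd' hsd'
      rw [PySem.Dict.get?_insert] at hsd'
      rw [PySem.Dict.get?_insert]
      split at hsd' <;> rename_i hc''
      · refine ⟨_, by rw [if_pos hc''], ?_⟩
        cases hsd'
        exact ⟨[x], [y], rfl, by simp, by simp, by
          simp [pvMinv, pvMaxv, PySem.List.min?, PySem.List.max?]⟩
      · obtain ⟨e', he', hv⟩ := hget c' sd' hsd'
        exact ⟨e', by rw [if_neg hc'']; exact he', hv⟩

theorem pvFoldl_rel {α : Type} {γ δ : Type} (R : γ → δ → Prop) (f : γ → α → γ) (g : δ → α → δ)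
    (hstep : ∀ s t a, R s t → R (f s a) (g t a)) :
    ∀ (l : List α) (s : γ) (t : δ), R s t → R (l.foldl f s) (l.foldl g t) := by
  intro l
  induction l with
  | nil => intro s t h; exact h
  | cons a l ih => intro s t h; exact ih _ _ (hstep s t a h)

-- ===== VERDICT (by name: the statement is the Claim_ definition above) =====
theorem find_rectangles_3_spec : Claim_equal_find_rectangles_3 := by
  intro picture _
  unfold Spec_find_rectangles_3 find_rectangles_3 find_rectangles_3_alt
  have hrel : pvRel
      ((PySem.List.enumerate picture 0).foldl
        (fun cd p => (PySem.List.enumerate p.2 0).foldl (fun cd q => pvStepA cd p.1 q.1 q.2) cd)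
        PySem.Dict.empty)
      ((PySem.List.enumerate picture 0).foldl
        (fun rd p => (PySem.List.enumerate p.2 0).foldl (fun rd q => pvStepB rd p.1 q.1 q.2) rd)
        PySem.Dict.empty) := by
    refine pvFoldl_rel pvRel _ _ (fun s t a h => ?_) _ _ _ ?_
    · exact pvFoldl_rel pvRel _ _ (fun s t q h => pvStep_rel s t a.1 q.1 q.2 h) _ s t h
    · exact ⟨by simp [PySem.Dict.keys, PySem.Dict.empty], by simp [PySem.Dict.keys, PySem.Dict.empty],
        fun c sd hsd => by rw [PySem.Dict.get?_empty] at hsd; cases hsd⟩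
  set cd := (PySem.List.enumerate picture 0).foldl
    (fun cd p => (PySem.List.enumerate p.2 0).foldl (fun cd q => pvStepA cd p.1 q.1 q.2) cd)
    PySem.Dict.empty with hcd
  set rd := (PySem.List.enumerate picture 0).foldl
    (fun rd p => (PySem.List.enumerate p.2 0).foldl (fun rd q => pvStepB rd p.1 q.1 q.2) rd)
    PySem.Dict.empty with hrd
  obtain ⟨hkeys, hnd, hget⟩ := hrel
  -- A's second loop inserts at fresh distinct keys, so it appends
  have hfold : (cd.items.foldl
      (fun (rd : PySem.Dict (Int × Int × Int) (List Int)) p => rd.insert p.1 (pvRectA p.2))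
      PySem.Dict.empty).items
      = cd.items.map (fun p => (p.1, pvRectA p.2)) := by
    have := PySem.Dict.items_foldl_insert_fresh cd.items (fun p => p.1) (fun p => pvRectA p.2)
      PySem.Dict.empty (fun a _ => PySem.Dict.contains_empty _) (by exact hnd)
    simpa [PySem.Dict.empty] using this
  have hitems : cd.items.map (fun p => (p.1, pvRectA p.2)) = rd.items := by
    rw [PySem.Dict.items_eq_map_keys cd hnd PySem.Dict.empty,
      PySem.Dict.items_eq_map_keys rd (hkeys ▸ hnd) ([] : List Int), ← hkeys, List.map_map]
    refine List.map_congr_left (fun k hk => ?_)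
    obtain ⟨sd, hsd⟩ : ∃ sd, cd.get? k = some sd := by
      rcases Option.eq_none_or_eq_some (cd.get? k) with h' | h'
      · exact absurd ((PySem.Dict.get?_eq_none_iff_not_mem_keys cd k).mp h') (by simpa using hk)
      · exact h'
    obtain ⟨e, he, X, Y, hsdXY, _, _, heXY⟩ := hget k sd hsd
    simp only [Function.comp]
    rw [PySem.Dict.getD_of_get?_eq_some cd PySem.Dict.empty hsd,
      PySem.Dict.getD_of_get?_eq_some rd [] he, hsdXY, heXY]
    unfold pvRectA
    simp [PySem.Dict.getD, PySem.Dict.get?, pvMinv, pvMaxv]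
  show (cd.items.foldl
      (fun (rd : PySem.Dict (Int × Int × Int) (List Int)) p => rd.insert p.1 (pvRectA p.2))
      PySem.Dict.empty).items.map (fun p => (p.1.1, p.1.2.1, p.1.2.2, p.2))
      = rd.items.map (fun p => (p.1.1, p.1.2.1, p.1.2.2, p.2))
  rw [hfold, ← hitems, List.map_map]
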